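-- pv_equiv track=rewrite | github.com/SchmidtDSE/api_dock | api_dock/database_config.py | _route_matches_pattern
-- ===== SOURCE A (Python) =====
-- def _route_matches_pattern(path: str, pattern: str) -> bool:
--     """Check if a path matches a route pattern.
--
--     Patterns use {{}} as wildcards for path segments.
--     Examples:
--         - "users/{{}}" matches "users/123"
--         - "users/{{user_id}}" matches "users/123"
--         - "users/{{user_id}}/permissions" matches "users/123/permissions"
--
--     Args:
--         path: The path to check.
--         pattern: The pattern to match against.
--
--     Returns:
--         True if path matches pattern, False otherwise.
--     """
--     if not isinstance(pattern, str):
--         return False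
--
--     path_parts = path.strip("/").split("/")
--     pattern_parts = pattern.strip("/").split("/")
--
--     if len(path_parts) != len(pattern_parts):
--         return False
--
--     for path_part, pattern_part in zip(path_parts, pattern_parts):
--         # Check if pattern part is a variable (starts and ends with double braces)
--         if pattern_part.startswith("{{") and pattern_part.endswith("}}"):
--             # Variable matches any value
--             continue
--         elif pattern_part != path_part:
--             # Literal part must match exactly
--             return False
--
--     return True
-- ===== SOURCE B (Python) =====
-- def _route_matches_pattern(path: str, pattern: str) -> bool:
--     """Check if a path matches a route pattern (recursive segment matcher)."""
--     if not isinstance(pattern, str):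
--         return False
--
--     def match(ps, qs):
--         if not ps and not qs:
--             return True
--         if not ps or not qs:
--             return False
--         q = qs[0]
--         if (q.startswith("{{") and q.endswith("}}")) or q == ps[0]:
--             return match(ps[1:], qs[1:])
--         return False
--
--     return match(path.strip("/").split("/"), pattern.strip("/").split("/"))
-- ===== Notes on version B (the rewrite author's own statement) =====
-- stated objective: alternative
-- what changed: Replaces A's up-front length comparison plus an early-return loop over zipped segment pairs with a single recursive matcher that walks both segment lists simultaneously, length mismatch falling out of the recursion's base cases.
import Mathlib
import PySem

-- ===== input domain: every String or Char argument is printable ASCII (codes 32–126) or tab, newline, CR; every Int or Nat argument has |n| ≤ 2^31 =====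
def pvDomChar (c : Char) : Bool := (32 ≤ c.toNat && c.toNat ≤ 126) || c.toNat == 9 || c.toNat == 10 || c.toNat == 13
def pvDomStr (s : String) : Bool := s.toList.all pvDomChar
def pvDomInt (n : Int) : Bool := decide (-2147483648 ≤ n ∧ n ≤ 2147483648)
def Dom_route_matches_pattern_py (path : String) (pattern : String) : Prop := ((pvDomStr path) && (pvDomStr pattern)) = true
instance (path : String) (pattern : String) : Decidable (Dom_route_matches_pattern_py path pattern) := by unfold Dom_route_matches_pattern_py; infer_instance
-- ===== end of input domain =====

-- ===== PORT A =====
-- B changes nothing observable: a recursive two-list segment matcher replaces A's length check + zip loop (objective: alternative decomposition).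
-- helper: path.strip("/").split("/") as a list of Char-list segments
def pvSplitA (s : String) : List (List Char) :=
  PySem.Chars.splitOn (PySem.Str.stripChars s "/").toList ['/']

-- the 'for path_part, pattern_part in zip(...)' loop with early return, as recursion over the zip list
def pvLoopA : List (List Char × List Char) → Bool
  | [] => true
  | (path_part, pattern_part) :: rest =>
    if PySem.Chars.startswith pattern_part ['{', '{'] && PySem.Chars.endswith pattern_part ['}', '}'] then
      pvLoopA rest
    else if pattern_part != path_part then
      false
    else
      pvLoopA rest

def route_matches_pattern_py (path : String) (pattern : String) : Bool :=
  -- isinstance(pattern, str) is always true under the type convention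
  let path_parts := pvSplitA path
  let pattern_parts := pvSplitA pattern
  if path_parts.length != pattern_parts.length then
    false
  else
    pvLoopA (path_parts.zip pattern_parts)

-- ===== PORT B =====
def pvSplitB (s : String) : List (List Char) :=
  PySem.Chars.splitOn (PySem.Str.stripChars s "/").toList ['/']

def pvMatchSegs : List (List Char) → List (List Char) → Bool
  | [], [] => true
  | [], _ :: _ => false
  | _ :: _, [] => false
  | p :: ps, q :: qs =>
    if (PySem.Chars.startswith q ['{', '{'] && PySem.Chars.endswith q ['}', '}']) || q == p then
      pvMatchSegs ps qs
    else
      false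

def route_matches_pattern_py_alt (path : String) (pattern : String) : Bool :=
  pvMatchSegs (pvSplitB path) (pvSplitB pattern)

-- ===== PRECONDITION & SPEC =====
def Spec_route_matches_pattern_py (path : String) (pattern : String) (out : Bool) : Prop := out = route_matches_pattern_py_alt path pattern
instance (path : String) (pattern : String) (out : Bool) : Decidable (Spec_route_matches_pattern_py path pattern out) := by unfold Spec_route_matches_pattern_py; infer_instance

-- ===== CLAIM (what is proved, stated in full; the proofs are below) =====
def Claim_equal_route_matches_pattern_py : Prop := ∀ (path : String) (pattern : String), Dom_route_matches_pattern_py path pattern → Spec_route_matches_pattern_py path pattern (route_matches_pattern_py path pattern)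

-- ===== LEMMAS AND PROOFS =====
theorem pv_main (ps qs : List (List Char)) :
    (if ps.length != qs.length then false else pvLoopA (ps.zip qs)) = pvMatchSegs ps qs := by
  induction ps generalizing qs with
  | nil => cases qs <;> simp [pvLoopA, pvMatchSegs]
  | cons p ps ih =>
    cases qs with
    | nil => simp [pvMatchSegs]
    | cons q qs =>
      simp only [List.zip_cons_cons, List.length_cons, pvLoopA, pvMatchSegs]
      rw [← ih qs]
      by_cases h1 : (PySem.Chars.startswith q ['{', '{'] && PySem.Chars.endswith q ['}', '}']) = true
      · simp [h1]
      · by_cases h2 : q = p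
        · simp [h2]
        · simp [h1, h2, bne]

-- ===== VERDICT (by name: the statement is the Claim_ definition above) =====
theorem route_matches_pattern_py_spec : Claim_equal_route_matches_pattern_py := by
  intro path pattern _
  unfold Spec_route_matches_pattern_py route_matches_pattern_py route_matches_pattern_py_alt pvSplitA pvSplitB
  exact pv_main _ _
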